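-- pv_equiv track=rewrite | github.com/alexm711/project_euler | 061.py | isLikelyCyclic
-- ===== SOURCE A (Python) =====
-- from collections import Counter
--
-- def isLikelyCyclic(nums):
-- 	strs = [str(num) for num in nums]
-- 	tokens = Counter()
-- 	for num in strs:
-- 		tokens[num[:2]]+=1
-- 		tokens[num[2:]]+=1
-- 	for key in tokens:
-- 		if tokens[key]!=2:
-- 			return False
-- 	return True
-- ===== SOURCE B (Python) =====
-- def isLikelyCyclic(nums):
--     toks = []
--     for n in nums:
--         s = str(n)
--         toks.append(s[:2])
--         toks.append(s[2:])
--     toks.sort()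
--     prev = None
--     for i in range(0, len(toks), 2):
--         if toks[i] != toks[i + 1] or toks[i] == prev:
--             return False
--         prev = toks[i]
--     return True
-- ===== Notes on version B (the rewrite author's own statement) =====
-- stated objective: alternative
-- what changed: Replaces A's Counter hash-counting (build token counts, then verify every count is 2) with a sort-then-pairwise-scan over the raw token list: sort the 2n tokens and walk them two at a time, requiring each adjacent pair equal and distinct from the previous pair's token.
import Mathlib
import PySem

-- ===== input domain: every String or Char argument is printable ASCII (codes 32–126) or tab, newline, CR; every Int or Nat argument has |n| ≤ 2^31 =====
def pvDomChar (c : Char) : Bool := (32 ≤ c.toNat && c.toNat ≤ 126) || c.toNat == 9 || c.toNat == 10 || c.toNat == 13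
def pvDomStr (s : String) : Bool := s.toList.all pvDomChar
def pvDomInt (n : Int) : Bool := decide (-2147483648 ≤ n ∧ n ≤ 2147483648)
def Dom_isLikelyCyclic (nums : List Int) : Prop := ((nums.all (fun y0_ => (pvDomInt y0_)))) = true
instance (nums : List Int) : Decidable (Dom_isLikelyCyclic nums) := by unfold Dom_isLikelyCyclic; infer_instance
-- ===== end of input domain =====

-- B replaces A's Counter (count tokens, then check every count is 2) by sort-then-pairwise-scan
-- over the raw token list (alternative decomposition; same value everywhere, both total).

-- ===== PORT A =====
def isLikelyCyclic (nums : List Int) : Bool :=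
  let strs := nums.map (fun num => PySem.Int.toStr num)
  let tokens : PySem.Dict String Int := strs.foldl (fun d num =>
      let d := d.modify (PySem.Str.slice num none (some 2)) 0 (· + 1)
      d.modify (PySem.Str.slice num (some 2) none) 0 (· + 1)) PySem.Dict.empty
  tokens.keys.all (fun key => tokens.getD key 0 == 2)

-- ===== PORT B =====
-- the paired walk of Source B's second loop: prev is the token of the previous pair
def pairScan : Option String → List String → Bool
  | _, [] => true
  | prev, a :: b :: rest => if a == b && prev != some a then pairScan (some a) rest else false
  | _, [_] => false

def isLikelyCyclic_alt (nums : List Int) : Bool :=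
  let toks := nums.flatMap (fun n =>
    let s := PySem.Int.toStr n
    [PySem.Str.slice s none (some 2), PySem.Str.slice s (some 2) none])
  pairScan none (PySem.List.sorted toks (fun x => x) false)

-- ===== PRECONDITION & SPEC =====
def Spec_isLikelyCyclic (nums : List Int) (out : Bool) : Prop := out = isLikelyCyclic_alt nums
instance (nums : List Int) (out : Bool) : Decidable (Spec_isLikelyCyclic nums out) := by unfold Spec_isLikelyCyclic; infer_instance

-- ===== CLAIM (what is proved, stated in full; the proofs are below) =====
def Claim_equal_isLikelyCyclic : Prop := ∀ (nums : List Int), Dom_isLikelyCyclic nums → Spec_isLikelyCyclic nums (isLikelyCyclic nums)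

-- ===== LEMMAS AND PROOFS =====

def pvTok (s : String) : List String :=
  [PySem.Str.slice s none (some 2), PySem.Str.slice s (some 2) none]

-- A's two Counter updates per string = one Counter update per token of the flattened list
lemma fold_two_gen (strs : List String) (d : PySem.Dict String Int) :
    strs.foldl (fun d num =>
      let d := d.modify (PySem.Str.slice num none (some 2)) 0 (· + 1)
      d.modify (PySem.Str.slice num (some 2) none) 0 (· + 1)) d
    = (strs.flatMap pvTok).foldl (fun d x => d.modify x 0 (· + 1)) d := by
  induction strs generalizing d with
  | nil => rfl
  | cons s t ih => simp [pvTok, ih]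

-- characterisation of A: every token occurs exactly twice in the token list
lemma A_char (nums : List Int) :
    isLikelyCyclic nums = true ↔
      ∀ t ∈ nums.flatMap (fun n => pvTok (PySem.Int.toStr n)),
        (nums.flatMap (fun n => pvTok (PySem.Int.toStr n))).count t = 2 := by
  simp only [isLikelyCyclic]
  rw [fold_two_gen, ← PySem.Dict.counter_eq_foldl]
  simp [PySem.Dict.keys_counter, PySem.Dict.getD_counter, PySem.Set.mem_ofList,
    List.all_eq_true, pvTok, List.flatMap_map]
  constructor
  · intro h t x hx ho; exact_mod_cast h t x hx ho
  · intro h t x hx ho; exact_mod_cast h t x hx ho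

-- the pair walk on a sorted list checks exactly "every element occurs twice",
-- with prev recording the previous group's token (which must not reappear)
lemma pairScan_char : ∀ (prev : Option String) (l : List String), l.Pairwise (· ≤ ·) →
    (∀ q ∈ prev, ∀ x ∈ l, q ≤ x) →
    (pairScan prev l = true ↔ ((∀ t ∈ l, l.count t = 2) ∧ ∀ q ∈ prev, q ∉ l)) := by
  intro prev l
  induction prev, l using pairScan.induct with
  | case1 prev => intro _ _; simp [pairScan]
  | case2 prev a b rest hcond ih =>
    intro h hp
    obtain ⟨hab, hpa⟩ : a = b ∧ ¬ prev = some a := by simpa using hcond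
    subst hab
    have ha : ∀ x ∈ a :: rest, a ≤ x := fun x hx => (List.pairwise_cons.1 h).1 x hx
    have hrest : rest.Pairwise (· ≤ ·) := (List.pairwise_cons.1 (List.pairwise_cons.1 h).2).2
    have hb : ∀ x ∈ rest, a ≤ x := (List.pairwise_cons.1 (List.pairwise_cons.1 h).2).1
    rw [pairScan, if_pos hcond]
    rw [ih hrest (by intro q hq x hx; rw [Option.mem_def, Option.some_inj] at hq; subst hq; exact hb x hx)]
    constructor
    · rintro ⟨hcnt, hnin⟩
      have hanin : a ∉ rest := hnin a rfl
      refine ⟨?_, ?_⟩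
      · intro t ht
        rcases List.mem_cons.1 ht with rfl | ht'
        · simp [List.count_eq_zero_of_not_mem hanin]
        · rcases List.mem_cons.1 ht' with rfl | ht''
          · simp [List.count_eq_zero_of_not_mem hanin]
          · have hta : t ≠ a := fun e => hanin (e ▸ ht'')
            have := hcnt t ht''
            simp [hta.symm, this]
      · intro q hq hmem
        rw [Option.mem_def] at hq
        have hqa : q ≠ a := by intro e; subst e; exact hpa hq
        rcases List.mem_cons.1 hmem with e | hmem'
        · exact hqa e
        · rcases List.mem_cons.1 hmem' with e | hmem''
          · exact hqa e
          · have h1 : q ≤ a := hp q hq a List.mem_cons_self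
            have h2 : a ≤ q := hb q hmem''
            exact hqa (le_antisymm h1 h2)
    · rintro ⟨hcnt, _⟩
      have hca : (a :: a :: rest).count a = 2 := hcnt a List.mem_cons_self
      have hanin : a ∉ rest := by
        have h0 : rest.count a = 0 := by simp at hca; omega
        exact List.not_mem_of_count_eq_zero h0
      refine ⟨?_, fun q hq => by rw [Option.mem_def, Option.some_inj] at hq; subst hq; exact hanin⟩
      intro t ht
      have hta : t ≠ a := fun e => hanin (e ▸ ht)
      have := hcnt t (List.mem_cons_of_mem _ (List.mem_cons_of_mem _ ht))
      simpa [List.count_cons, hta.symm] using this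
  | case3 prev a b rest hcond =>
    intro h hp
    have ha : ∀ x ∈ b :: rest, a ≤ x := fun x hx => (List.pairwise_cons.1 h).1 x hx
    have hb : ∀ x ∈ rest, b ≤ x := (List.pairwise_cons.1 (List.pairwise_cons.1 h).2).1
    rw [pairScan, if_neg hcond]
    constructor
    · intro hf; simp at hf
    · rintro ⟨hcnt, hnin⟩
      rw [Bool.and_eq_true, beq_iff_eq, bne_iff_ne] at hcond
      by_cases hab : a = b
      · -- then prev = some a, which is in the list
        have hpa : prev = some a := by
          by_contra hne
          exact hcond ⟨hab, hne⟩
        exact absurd List.mem_cons_self (hnin a (by rw [Option.mem_def, hpa]))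
      · have hmem : a ∉ b :: rest := by
          intro hm
          rcases List.mem_cons.1 hm with e | hm'
          · exact hab e
          · exact hab (le_antisymm (ha b List.mem_cons_self) (hb a hm'))
        have hca := hcnt a List.mem_cons_self
        rw [List.count_cons_self, List.count_eq_zero_of_not_mem hmem] at hca
        omega
  | case4 prev a =>
    intro _ _
    simp [pairScan]

lemma B_char (nums : List Int) :
    isLikelyCyclic_alt nums = true ↔
      ∀ t ∈ nums.flatMap (fun n => pvTok (PySem.Int.toStr n)),
        (nums.flatMap (fun n => pvTok (PySem.Int.toStr n))).count t = 2 := by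
  simp only [isLikelyCyclic_alt]
  have hT : (nums.flatMap (fun n =>
      let s := PySem.Int.toStr n
      [PySem.Str.slice s none (some 2), PySem.Str.slice s (some 2) none]))
      = nums.flatMap (fun n => pvTok (PySem.Int.toStr n)) := by
    simp [pvTok]
  rw [hT]
  set T := nums.flatMap (fun n => pvTok (PySem.Int.toStr n)) with hTdef
  have hperm : (PySem.List.sorted T (fun x => x) false).Perm T := PySem.List.sorted_perm T _ _
  rw [pairScan_char none _ (by simpa using PySem.List.sorted_pairwise T (fun x => x))
        (by simp)]
  constructor
  · rintro ⟨hcnt, _⟩ t ht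
    have := hcnt t (hperm.mem_iff.2 ht)
    rwa [hperm.count_eq] at this
  · intro hcnt
    refine ⟨fun t ht => ?_, by simp⟩
    rw [hperm.count_eq]
    exact hcnt t (hperm.mem_iff.1 ht)

-- ===== VERDICT (by name: the statement is the Claim_ definition above) =====
theorem isLikelyCyclic_spec : Claim_equal_isLikelyCyclic := by
  intro nums _
  unfold Spec_isLikelyCyclic
  rw [Bool.eq_iff_iff, A_char, B_char]
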